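-- pv_equiv track=rewrite | github.com/audxo112/Algorithm | 0x09/bfs/17071_hide_and_seek5.py | solution
-- ===== SOURCE A (Python) =====
-- from collections import deque
--
-- def solution(N, K):
--     if N == K:
--         return 0
--
--     # 수빈이가 방문한 지점을 저장을 하는데 홀수 시간 인지 짝수 시간 인지를 저장 한다
--     # 수빈이가 +1 -1을 각각 1번씩 실행하게 되면 같은 위치게 오게되고
--     # 동생이 그 지점을 밟게 되면 동생과 수빈이가 만나는 시간이된다
--     # visited 의 경우 수빈이가 밟을때 저장을 하기 때문에
--     # 무조건 동생이 밟은 시점보다 이전이다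
--
--     visited = [[False] * 500001 for _ in range(2)]
--     visited[0][N] = True
--     queue = deque([N])
--     t, tmp = 0, 0
--     while queue:
--         K += (t := t + 1)
--         if K > 500000:
--             return -1
--         if visited[t % 2][K]:
--             return t
--
--         for _ in range(len(queue)):
--             n = queue.popleft()
--             for nn in [n - 1, n + 1, n * 2]:
--                 if nn < 0 or nn > 500000 or visited[t % 2][nn]:
--                     continue
--                 if nn == K:
--                     return t
--                 # 지난 시간기준 짝, 홀을 고려하여 밟은적 있는지를 저장한다
--                 visited[t % 2][nn] = True
--                 queue.append(nn)
--     return -1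
-- ===== SOURCE B (Python) =====
-- def solution(N, K):
--     if N == K:
--         return 0
--     LIMIT = 500000
--     # The brother stands at K + t*(t+1)//2 after t steps, which grows monotonically,
--     # so only times t with that position still on the board can give a meeting
--     # (at most 1000 of them when K >= 0).  Count them first.
--     tmax = 0
--     while tmax < 1000 and K + (tmax + 1) * (tmax + 2) // 2 <= LIMIT:
--         tmax += 1
--     # Phase 1: level BFS from N over (position, time-parity) pairs, recording
--     # dist[parity][pos] = the time at which pos is first reached with that parity.
--     # Only the first tmax levels can matter.
--     dist = [[-1] * (LIMIT + 1) for _ in range(2)]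
--     dist[0][N] = 0
--     frontier = [N]
--     level = 0
--     while frontier and level < tmax:
--         level += 1
--         row = dist[level % 2]
--         nxt = []
--         for n in frontier:
--             for m in (n - 1, n + 1, 2 * n):
--                 if 0 <= m <= LIMIT and row[m] == -1:
--                     row[m] = level
--                     nxt.append(m)
--         frontier = nxt
--     # Phase 2: advance the brother step by step; they meet at the first time t
--     # whose position is reachable by time t with parity t.
--     t = 0
--     while True:
--         t += 1
--         K += t
--         if K > LIMIT:
--             return -1
--         d = dist[t % 2][K]
--         if 0 <= d <= t:
--             return t
-- ===== Notes on version B (the rewrite author's own statement) =====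
-- stated objective: alternative
-- what changed: Replaces A's interleaved search (BFS levels advanced in lockstep with the moving brother, with per-node deque pops and an in-loop catch of the target) by a staged computation: phase 1 runs a plain level BFS from N recording dist[parity][pos], capped at the number of time steps on which the brother can still be on the board (at most 1000 for K >= 0); phase 2 is a simple arithmetic scan over t that reads the finished table.
-- outside the precondition, e.g. on solution(-8, -29): A returns -1, B returns 6; on solution(500000, -3): A returns 999, B returns 1; on solution(500001, 0): A raises IndexError, B raises IndexError
import Mathlib
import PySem

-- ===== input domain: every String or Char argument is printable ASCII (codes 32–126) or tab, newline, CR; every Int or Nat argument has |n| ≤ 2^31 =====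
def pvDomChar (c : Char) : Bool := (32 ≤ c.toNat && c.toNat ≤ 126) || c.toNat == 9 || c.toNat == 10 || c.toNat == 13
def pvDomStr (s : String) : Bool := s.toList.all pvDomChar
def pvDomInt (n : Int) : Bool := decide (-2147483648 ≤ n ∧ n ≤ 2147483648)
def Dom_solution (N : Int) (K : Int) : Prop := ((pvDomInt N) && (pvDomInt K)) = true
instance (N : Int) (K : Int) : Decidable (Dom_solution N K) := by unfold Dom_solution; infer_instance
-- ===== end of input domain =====

-- B replaces A's interleaved search (BFS levels advanced in lockstep with the moving
-- brother) by a staged one: a plain level BFS recording dist[parity][pos] first, then a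
-- separate arithmetic scan over t reading the finished table (objective: alternative).

-- ===== PORT A =====
-- Python visited-row read `row[i]` / write `row[i] = True`; exact for 0 ≤ i ≤ 500000, the
-- only indices reached on inputs admitted by Pre_ (negative Python indices are excluded there).
def pvGetRow (row : Array Bool) (i : Int) : Bool := row.getD i.toNat false
def pvMarkRow (row : Array Bool) (i : Int) : Array Bool := row.setIfInBounds i.toNat true

-- inner `for nn in [n - 1, n + 1, n * 2]` loop; `none` = the `return t` on `nn == K`
def pvNbrsA (Kc : Int) : List Int → Array Bool → Array Int → Option (Array Bool × Array Int)
  | [], v, acc => some (v, acc)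
  | nn :: rest, v, acc =>
    if nn < 0 || nn > 500000 || pvGetRow v nn then pvNbrsA Kc rest v acc
    else if nn == Kc then none
    else pvNbrsA Kc rest (pvMarkRow v nn) (acc.push nn)

-- `for _ in range(len(queue)): n = queue.popleft(); …`; acc collects the appended nodes
def pvExpandA (Kc : Int) : List Int → Array Bool → Array Int → Option (Array Bool × Array Int)
  | [], v, acc => some (v, acc)
  | n :: rest, v, acc =>
    match pvNbrsA Kc [n - 1, n + 1, n * 2] v acc with
    | none => none
    | some (v', acc') => pvExpandA Kc rest v' acc'

-- the `while queue:` loop; v0/v1 are visited[0]/visited[1]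
def pvLoopA (v0 v1 : Array Bool) (queue : List Int) (t : Nat) (K : Int) : Int :=
  if queue.isEmpty then -1
  else if _h : K + ((t : Int) + 1) > 500000 then -1
  else if pvGetRow (if (t + 1) % 2 == 0 then v0 else v1) (K + ((t : Int) + 1)) then (t : Int) + 1
  else
    match pvExpandA (K + ((t : Int) + 1)) queue (if (t + 1) % 2 == 0 then v0 else v1) #[] with
    | none => (t : Int) + 1
    | some (v', q') =>
      if (t + 1) % 2 == 0 then pvLoopA v' v1 q'.toList (t + 1) (K + ((t : Int) + 1))
      else pvLoopA v0 v' q'.toList (t + 1) (K + ((t : Int) + 1))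
  termination_by (500001 - K).toNat
  decreasing_by all_goals omega

def solution (N : Int) (K : Int) : Int :=
  if N == K then 0
  else pvLoopA (pvMarkRow (Array.replicate 500001 false) N) (Array.replicate 500001 false) [N] 0 K

-- ===== PORT B =====
-- dist-row read `row[i]`; exact for 0 ≤ i ≤ 500000 (guards in B keep indices there on Pre_)
def pvDGet (row : Array Int) (i : Int) : Int := row.getD i.toNat (-1)

-- B's phase-1 inner loops: `for n in frontier: for m in (n-1, n+1, 2*n): …`
def pvStepB (lv : Int) (frontier : List Int) (row : Array Int) : Array Int × Array Int :=
  frontier.foldl (fun st (n : Int) =>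
    [n - 1, n + 1, 2 * n].foldl (fun (st : Array Int × Array Int) (m : Int) =>
      match st with
      | (row, nxt) =>
        if 0 ≤ m && m ≤ 500000 && pvDGet row m == -1
        then (row.setIfInBounds m.toNat lv, nxt.push m) else (row, nxt)) st)
    (row, #[])

-- B's `while tmax < 1000 and K + (tmax+1)*(tmax+2)//2 <= LIMIT:` counter; the Python
-- `//` acts on a nonnegative numerator and divisor 2, where Lean's `/` on Int agrees
def pvTmaxLoop (K : Int) (tmax : Nat) : Nat :=
  if _h : tmax < 1000 ∧ K + ((tmax : Int) + 1) * ((tmax : Int) + 2) / 2 ≤ 500000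
  then pvTmaxLoop K (tmax + 1)
  else tmax
  termination_by 1000 - tmax
  decreasing_by omega

-- B's phase-1 `while frontier and level < tmax:` loop
def pvBFSB (frontier : List Int) (level tmax : Nat) (d0 d1 : Array Int) : Array Int × Array Int :=
  if frontier.isEmpty then (d0, d1)
  else if _h : tmax ≤ level then (d0, d1)
  else if (level + 1) % 2 == 0 then
    let p := pvStepB ((level : Int) + 1) frontier d0
    pvBFSB p.2.toList (level + 1) tmax p.1 d1
  else
    let p := pvStepB ((level : Int) + 1) frontier d1
    pvBFSB p.2.toList (level + 1) tmax d0 p.1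
  termination_by tmax - level
  decreasing_by all_goals omega

-- B's phase-2 `while True:` scan
def pvScanB (d0 d1 : Array Int) (t : Nat) (K : Int) : Int :=
  if _h : K + ((t : Int) + 1) > 500000 then -1
  else
    if 0 ≤ pvDGet (if (t + 1) % 2 == 0 then d0 else d1) (K + ((t : Int) + 1)) ∧
       pvDGet (if (t + 1) % 2 == 0 then d0 else d1) (K + ((t : Int) + 1)) ≤ (t : Int) + 1
    then (t : Int) + 1
    else pvScanB d0 d1 (t + 1) (K + ((t : Int) + 1))
  termination_by (500001 - K).toNat
  decreasing_by omega

def solution_alt (N : Int) (K : Int) : Int :=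
  if N == K then 0
  else
    let r := pvBFSB [N] 0 (pvTmaxLoop K 0)
      ((Array.replicate 500001 (-1 : Int)).setIfInBounds N.toNat 0)
      (Array.replicate 500001 (-1 : Int))
    pvScanB r.1 r.2 0 K

-- ===== PRECONDITION & SPEC =====
-- Pre_ excludes positions/targets outside the problem's 0..500000 board, where A either raises
-- IndexError or returns accidental values through Python negative-index wraparound.
def Pre_solution (N : Int) (K : Int) : Prop := 0 ≤ N ∧ N ≤ 500000 ∧ 0 ≤ K
instance (N : Int) (K : Int) : Decidable (Pre_solution N K) := by unfold Pre_solution; infer_instance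
def pvWitness_solution : Int × Int := (3, 7)

def Spec_solution (N : Int) (K : Int) (out : Int) : Prop := out = solution_alt N K
instance (N : Int) (K : Int) (out : Int) : Decidable (Spec_solution N K out) := by unfold Spec_solution; infer_instance

-- ===== CLAIM (what is proved, stated in full; the proofs are below) =====
def Claim_equal_solution : Prop := ∀ (N : Int) (K : Int), Dom_solution N K → Pre_solution N K → Spec_solution N K (solution N K)

-- ===== LEMMAS AND PROOFS =====

-- generic array read-after-setIfInBounds
lemma getD_setIfInBounds {α : Type} (a : Array α) (i j : Nat) (b d : α) :
    (a.setIfInBounds i b).getD j d = if j = i ∧ i < a.size then b else a.getD j d := by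
  simp only [Array.getD, Array.size_setIfInBounds, Array.getInternal_eq_getElem]
  by_cases hj : j < a.size
  · simp only [dif_pos hj]
    rw [Array.getElem_setIfInBounds hj]
    by_cases hji : i = j
    · subst hji; simp [hj]
    · rw [if_neg hji, if_neg (by rintro ⟨rfl, _⟩; exact hji rfl)]
  · simp only [dif_neg hj]
    rw [if_neg]
    rintro ⟨rfl, hi⟩; exact hj hi

lemma getD_replicate {α : Type} (n j : Nat) (c d : α) :
    (Array.replicate n c).getD j d = if j < n then c else d := by
  simp only [Array.getD, Array.size_replicate, Array.getInternal_eq_getElem]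
  split
  · rw [Array.getElem_replicate]
  · rfl

-- the common characterisation of a "new node" relative to visited `cur` and a frontier
def pvGood (cur : Int → Bool) (m : Int) : Prop := 0 ≤ m ∧ m ≤ 500000 ∧ cur m = false

def pvReach (cur : Int → Bool) (fr : List Int) (x : Int) : Prop :=
  (∃ n ∈ fr, x = n - 1 ∨ x = n + 1 ∨ x = n * 2) ∧ pvGood cur x

lemma pvReach_congr (cur cur' : Int → Bool) (l1 l2 : List Int)
    (hc : ∀ x : Int, 0 ≤ x → x ≤ 500000 → cur x = cur' x)
    (h : ∀ x : Int, x ∈ l1 ↔ x ∈ l2) (x : Int) :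
    pvReach cur l1 x ↔ pvReach cur' l2 x := by
  unfold pvReach pvGood
  constructor
  · rintro ⟨⟨n, hn, hx⟩, h0, h1, h2⟩
    exact ⟨⟨n, (h n).mp hn, hx⟩, h0, h1, by rw [← hc x h0 h1]; exact h2⟩
  · rintro ⟨⟨n, hn, hx⟩, h0, h1, h2⟩
    exact ⟨⟨n, (h n).mpr hn, hx⟩, h0, h1, by rw [hc x h0 h1]; exact h2⟩

-- ---------- A-side expansion specs ----------
lemma nbrsA_spec (Kc : Int) (cur : Int → Bool) :
    ∀ (ms : List Int) (v : Array Bool) (acc : Array Int),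
    v.size = 500001 →
    (∀ x : Int, 0 ≤ x → x ≤ 500000 →
      pvGetRow v x = (cur x || decide (x ∈ acc.toList))) →
    Kc ∉ acc.toList →
    (pvNbrsA Kc ms v acc = none → Kc ∈ ms ∧ pvGood cur Kc)
    ∧ (∀ v' acc', pvNbrsA Kc ms v acc = some (v', acc') →
        v'.size = 500001
        ∧ (∀ x : Int, 0 ≤ x → x ≤ 500000 →
            pvGetRow v' x = (cur x || decide (x ∈ acc'.toList)))
        ∧ Kc ∉ acc'.toList
        ∧ (∀ x : Int, x ∈ acc'.toList ↔ x ∈ acc.toList ∨ (x ∈ ms ∧ pvGood cur x))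
        ∧ ¬ (Kc ∈ ms ∧ pvGood cur Kc)) := by
  intro ms
  induction ms with
  | nil =>
    intro v acc hsz hv hacc
    constructor
    · intro h; simp [pvNbrsA] at h
    · intro v' acc' h
      simp only [pvNbrsA, Option.some.injEq, Prod.mk.injEq] at h
      obtain ⟨h1, h2⟩ := h
      subst h1; subst h2
      exact ⟨hsz, hv, hacc, by simp, by simp⟩
  | cons nn rest ih =>
    intro v acc hsz hv hacc
    by_cases h1 : (nn < 0 || nn > 500000 || pvGetRow v nn) = true
    · -- A skips nn
      have h1' : (nn < 0 ∨ 500000 < nn) ∨ pvGetRow v nn = true := by simpa using h1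
      have hkey : pvGood cur nn → nn ∈ acc.toList := by
        rintro ⟨hg0, hg1, hg2⟩
        rcases h1' with (h | h) | h
        · omega
        · omega
        · rw [hv nn hg0 hg1, hg2] at h
          simpa using h
      have hA : pvNbrsA Kc (nn :: rest) v acc = pvNbrsA Kc rest v acc := by
        rw [pvNbrsA, if_pos h1]
      obtain ⟨ihn, ihs⟩ := ih v acc hsz hv hacc
      constructor
      · intro h
        obtain ⟨hm, hg⟩ := ihn (hA ▸ h)
        exact ⟨List.mem_cons_of_mem _ hm, hg⟩
      · intro v' acc' h
        obtain ⟨hsz', hv', hacc', hchar, hneg⟩ := ihs v' acc' (hA ▸ h)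
        refine ⟨hsz', hv', hacc', ?_, ?_⟩
        · intro x
          rw [hchar x]
          constructor
          · rintro (h' | ⟨hm, hg⟩)
            · exact Or.inl h'
            · exact Or.inr ⟨List.mem_cons_of_mem _ hm, hg⟩
          · rintro (h' | ⟨hm, hg⟩)
            · exact Or.inl h'
            · rcases List.mem_cons.mp hm with rfl | hm'
              · exact Or.inl (hkey hg)
              · exact Or.inr ⟨hm', hg⟩
        · rintro ⟨hm, hg⟩
          rcases List.mem_cons.mp hm with rfl | hm'
          · exact hacc (hkey hg)
          · exact hneg ⟨hm', hg⟩
    · -- A keeps nn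
      have h1' : (0 ≤ nn ∧ nn ≤ 500000) ∧ pvGetRow v nn = false := by
        simpa [not_or] using h1
      obtain ⟨⟨hge', hle'⟩, hrow⟩ := h1'
      have hcuracc : cur nn = false ∧ nn ∉ acc.toList := by
        rw [hv nn hge' hle'] at hrow
        simpa using hrow
      have hgood : pvGood cur nn := ⟨hge', hle', hcuracc.1⟩
      by_cases h2 : (nn == Kc) = true
      · have hKceq : nn = Kc := by simpa using h2
        have hA : pvNbrsA Kc (nn :: rest) v acc = none := by
          rw [pvNbrsA, if_neg h1, if_pos h2]
        constructor
        · intro _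
          exact ⟨by rw [← hKceq]; exact List.mem_cons_self, by rw [← hKceq]; exact hgood⟩
        · intro v' acc' h; rw [hA] at h; exact absurd h (by simp)
      · have hKcne : nn ≠ Kc := by simpa using h2
        have hA : pvNbrsA Kc (nn :: rest) v acc
            = pvNbrsA Kc rest (pvMarkRow v nn) (acc.push nn) := by
          rw [pvNbrsA, if_neg h1, if_neg h2]
        have htl : (acc.push nn).toList = acc.toList ++ [nn] := Array.toList_push
        have hsz2 : (pvMarkRow v nn).size = 500001 := by
          unfold pvMarkRow; rw [Array.size_setIfInBounds]; exact hsz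
        have hv2 : ∀ x : Int, 0 ≤ x → x ≤ 500000 →
            pvGetRow (pvMarkRow v nn) x
              = (cur x || decide (x ∈ (acc.push nn).toList)) := by
          intro x hx0 hx1
          unfold pvGetRow pvMarkRow
          rw [getD_setIfInBounds]
          rw [htl]
          by_cases hx : x = nn
          · subst hx
            rw [if_pos ⟨rfl, by omega⟩]
            simp [hcuracc.1]
          · rw [if_neg (by rintro ⟨he, _⟩; exact hx (by omega))]
            have := hv x hx0 hx1
            unfold pvGetRow at this
            rw [this]
            simp [List.mem_append, hx]
        have hacc2 : Kc ∉ (acc.push nn).toList := by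
          rw [htl]
          simp [hacc, Ne.symm hKcne]
        obtain ⟨ihn, ihs⟩ := ih (pvMarkRow v nn) (acc.push nn) hsz2 hv2 hacc2
        constructor
        · intro h
          obtain ⟨hm, hg⟩ := ihn (hA ▸ h)
          exact ⟨List.mem_cons_of_mem _ hm, hg⟩
        · intro v' acc' h
          obtain ⟨hsz', hv', hacc', hchar, hneg⟩ := ihs v' acc' (hA ▸ h)
          refine ⟨hsz', hv', hacc', ?_, ?_⟩
          · intro x
            rw [hchar x, htl]
            simp only [List.mem_append, List.mem_cons, List.not_mem_nil, or_false]
            constructor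
            · rintro ((h' | rfl) | ⟨hm, hg⟩)
              · exact Or.inl h'
              · exact Or.inr ⟨Or.inl rfl, hgood⟩
              · exact Or.inr ⟨Or.inr hm, hg⟩
            · rintro (h' | ⟨rfl | hm, hg⟩)
              · exact Or.inl (Or.inl h')
              · exact Or.inl (Or.inr rfl)
              · exact Or.inr ⟨hm, hg⟩
          · rintro ⟨hm, hg⟩
            rcases List.mem_cons.mp hm with rfl | hm'
            · exact hKcne rfl
            · exact hneg ⟨hm', hg⟩

lemma expandA_spec (Kc : Int) (cur : Int → Bool) :
    ∀ (fr : List Int) (v : Array Bool) (acc : Array Int),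
    v.size = 500001 →
    (∀ x : Int, 0 ≤ x → x ≤ 500000 →
      pvGetRow v x = (cur x || decide (x ∈ acc.toList))) →
    Kc ∉ acc.toList →
    (pvExpandA Kc fr v acc = none → pvReach cur fr Kc)
    ∧ (∀ v' acc', pvExpandA Kc fr v acc = some (v', acc') →
        v'.size = 500001
        ∧ (∀ x : Int, 0 ≤ x → x ≤ 500000 →
            pvGetRow v' x = (cur x || decide (x ∈ acc'.toList)))
        ∧ Kc ∉ acc'.toList
        ∧ (∀ x : Int, x ∈ acc'.toList ↔ x ∈ acc.toList ∨ pvReach cur fr x)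
        ∧ ¬ pvReach cur fr Kc) := by
  intro fr
  induction fr with
  | nil =>
    intro v acc hsz hv hacc
    constructor
    · intro h; simp [pvExpandA] at h
    · intro v' acc' h
      simp only [pvExpandA, Option.some.injEq, Prod.mk.injEq] at h
      obtain ⟨h1, h2⟩ := h
      subst h1; subst h2
      refine ⟨hsz, hv, hacc, ?_, ?_⟩
      · intro x; simp [pvReach]
      · rintro ⟨⟨n, hn, _⟩, _⟩; simp at hn
  | cons n rest ih =>
    intro v acc hsz hv hacc
    have htrip : ∀ x : Int, x ∈ [n - 1, n + 1, n * 2] ↔ (x = n - 1 ∨ x = n + 1 ∨ x = n * 2) := by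
      intro x; simp
    obtain ⟨hn1, hs1⟩ := nbrsA_spec Kc cur [n - 1, n + 1, n * 2] v acc hsz hv hacc
    cases hm : pvNbrsA Kc [n - 1, n + 1, n * 2] v acc with
    | none =>
      have hA : pvExpandA Kc (n :: rest) v acc = none := by rw [pvExpandA, hm]
      constructor
      · intro _
        obtain ⟨hmem, hg⟩ := hn1 hm
        exact ⟨⟨n, List.mem_cons_self, (htrip Kc).mp hmem⟩, hg⟩
      · intro v' acc' h; rw [hA] at h; exact absurd h (by simp)
    | some pa =>
      obtain ⟨v1, acc1⟩ := pa
      obtain ⟨hsz1, hv1, hacc1, hchar1, hneg1⟩ := hs1 v1 acc1 hm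
      have hA : pvExpandA Kc (n :: rest) v acc = pvExpandA Kc rest v1 acc1 := by
        rw [pvExpandA, hm]
      obtain ⟨ihn, ihs⟩ := ih v1 acc1 hsz1 hv1 hacc1
      have hreach : ∀ x : Int, pvReach cur (n :: rest) x
          ↔ (x ∈ [n - 1, n + 1, n * 2] ∧ pvGood cur x) ∨ pvReach cur rest x := by
        intro x
        unfold pvReach
        rw [htrip x]
        constructor
        · rintro ⟨⟨n', hn', hx⟩, hg⟩
          rcases List.mem_cons.mp hn' with rfl | hn''
          · exact Or.inl ⟨hx, hg⟩
          · exact Or.inr ⟨⟨n', hn'', hx⟩, hg⟩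
        · rintro (⟨hx, hg⟩ | ⟨⟨n', hn', hx⟩, hg⟩)
          · exact ⟨⟨n, List.mem_cons_self, hx⟩, hg⟩
          · exact ⟨⟨n', List.mem_cons_of_mem _ hn', hx⟩, hg⟩
      constructor
      · intro h
        have := ihn (hA ▸ h)
        rw [hreach Kc]
        exact Or.inr this
      · intro v' acc' h
        obtain ⟨hsz', hv', hacc', hchar, hneg⟩ := ihs v' acc' (hA ▸ h)
        refine ⟨hsz', hv', hacc', ?_, ?_⟩
        · intro x
          rw [hchar x, hchar1 x, hreach x, htrip x]
          tauto
        · rw [hreach Kc]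
          rintro (⟨hx, hg⟩ | h')
          · exact hneg1 ⟨hx, hg⟩
          · exact hneg h'

-- ---------- B-side expansion specs ----------
lemma stepB_inner_spec (lv : Int) (hlv : 0 ≤ lv) (cur : Int → Bool) :
    ∀ (ms : List Int) (row : Array Int) (acc : Array Int),
    row.size = 500001 →
    (∀ x : Int, 0 ≤ x → x ≤ 500000 →
      (pvDGet row x == -1) = (!(cur x) && !(decide (x ∈ acc.toList)))) →
    (∀ x : Int, 0 ≤ x → x ≤ 500000 → x ∈ acc.toList → pvDGet row x = lv) →
    ∀ row' acc',
      ms.foldl (fun (st : Array Int × Array Int) (m : Int) =>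
        match st with
        | (row, nxt) =>
          if 0 ≤ m && m ≤ 500000 && pvDGet row m == -1
          then (row.setIfInBounds m.toNat lv, nxt.push m) else (row, nxt)) (row, acc)
        = (row', acc') →
      row'.size = 500001
      ∧ (∀ x : Int, 0 ≤ x → x ≤ 500000 →
          (pvDGet row' x == -1) = (!(cur x) && !(decide (x ∈ acc'.toList))))
      ∧ (∀ x : Int, 0 ≤ x → x ≤ 500000 → x ∈ acc'.toList → pvDGet row' x = lv)
      ∧ (∀ x : Int, x ∈ acc'.toList ↔ x ∈ acc.toList ∨ (x ∈ ms ∧ pvGood cur x))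
      ∧ (∀ x : Int, 0 ≤ x → x ≤ 500000 → x ∉ acc'.toList → pvDGet row' x = pvDGet row x) := by
  intro ms
  induction ms with
  | nil =>
    intro row acc hsz hv hval row' acc' h
    simp only [List.foldl_nil, Prod.mk.injEq] at h
    obtain ⟨h1, h2⟩ := h
    subst h1; subst h2
    exact ⟨hsz, hv, hval, by simp, fun x _ _ _ => rfl⟩
  | cons m rest ih =>
    intro row acc hsz hv hval row' acc' h
    simp only [List.foldl_cons] at h
    by_cases hc : (0 ≤ m && m ≤ 500000 && pvDGet row m == -1) = true
    · -- the cell is free: write lv and append m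
      have hc' : (0 ≤ m ∧ m ≤ 500000) ∧ pvDGet row m = -1 := by
        simpa using hc
      obtain ⟨⟨hm0, hm1⟩, hmrow'⟩ := hc'
      have hmrow : (pvDGet row m == -1) = true := by simp [hmrow']
      have hcuracc : cur m = false ∧ m ∉ acc.toList := by
        rw [hv m hm0 hm1] at hmrow
        simpa using hmrow
      have hgood : pvGood cur m := ⟨hm0, hm1, hcuracc.1⟩
      rw [if_pos hc] at h
      set row2 := row.setIfInBounds m.toNat lv with hrow2
      set acc2 := acc.push m with hacc2
      have htl : acc2.toList = acc.toList ++ [m] := Array.toList_push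
      have hsz2 : row2.size = 500001 := by
        rw [hrow2, Array.size_setIfInBounds]; exact hsz
      have hget2 : ∀ x : Int, 0 ≤ x → x ≤ 500000 →
          pvDGet row2 x = if x = m then lv else pvDGet row x := by
        intro x hx0 hx1
        rw [hrow2]
        unfold pvDGet
        rw [getD_setIfInBounds]
        by_cases hx : x = m
        · subst hx; rw [if_pos ⟨rfl, by omega⟩, if_pos rfl]
        · rw [if_neg (by rintro ⟨he, _⟩; exact hx (by omega)), if_neg hx]
      have hv2 : ∀ x : Int, 0 ≤ x → x ≤ 500000 →
          (pvDGet row2 x == -1) = (!(cur x) && !(decide (x ∈ acc2.toList))) := by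
        intro x hx0 hx1
        rw [hget2 x hx0 hx1, htl]
        by_cases hx : x = m
        · subst hx
          rw [if_pos rfl]
          simp only [List.mem_append, List.mem_cons, List.not_mem_nil, or_false]
          have : (lv == -1) = false := by simp; omega
          simp [this]
        · rw [if_neg hx, hv x hx0 hx1]
          simp [List.mem_append, hx]
      have hval2 : ∀ x : Int, 0 ≤ x → x ≤ 500000 → x ∈ acc2.toList → pvDGet row2 x = lv := by
        intro x hx0 hx1 hx
        rw [htl] at hx
        rw [hget2 x hx0 hx1]
        rcases (by simpa using hx : x ∈ acc.toList ∨ x = m) with hx' | rfl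
        · have hxm : x ≠ m := fun he => hcuracc.2 (he ▸ hx')
          rw [if_neg hxm]
          exact hval x hx0 hx1 hx'
        · rw [if_pos rfl]
      obtain ⟨hsz', hv', hval', hchar, hpres⟩ := ih row2 acc2 hsz2 hv2 hval2 row' acc' h
      have hsub : ∀ x : Int, x ∈ acc2.toList → x ∈ acc'.toList := by
        intro x hx; exact (hchar x).mpr (Or.inl hx)
      refine ⟨hsz', hv', hval', ?_, ?_⟩
      · intro x
        rw [hchar x, htl]
        simp only [List.mem_append, List.mem_cons, List.not_mem_nil, or_false]
        constructor
        · rintro ((h' | rfl) | ⟨hm, hg⟩)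
          · exact Or.inl h'
          · exact Or.inr ⟨Or.inl rfl, hgood⟩
          · exact Or.inr ⟨Or.inr hm, hg⟩
        · rintro (h' | ⟨rfl | hm, hg⟩)
          · exact Or.inl (Or.inl h')
          · exact Or.inl (Or.inr rfl)
          · exact Or.inr ⟨hm, hg⟩
      · intro x hx0 hx1 hx
        have hx2 : x ∉ acc2.toList := fun hmem => hx (hsub x hmem)
        have hxm : x ≠ m := by
          intro he; subst he
          exact hx2 (by rw [htl]; simp)
        rw [hpres x hx0 hx1 hx, hget2 x hx0 hx1, if_neg hxm]
    · -- the cell is out of range or already set: skip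
      have hkey : (m ∈ ([m] : List Int) ∧ pvGood cur m) → m ∈ acc.toList := by
        rintro ⟨_, hg0, hg1, hg2⟩
        have : (pvDGet row m == -1) = false := by
          rcases Bool.eq_false_or_eq_true (pvDGet row m == -1) with h' | h'
          · exact absurd (by simp [hg0, hg1, h']) hc
          · exact h'
        rw [hv m hg0 hg1, hg2] at this
        simpa using this
      rw [if_neg hc] at h
      obtain ⟨hsz', hv', hval', hchar, hpres⟩ := ih row acc hsz hv hval row' acc' h
      refine ⟨hsz', hv', hval', ?_, hpres⟩
      intro x
      rw [hchar x]
      constructor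
      · rintro (h' | ⟨hm, hg⟩)
        · exact Or.inl h'
        · exact Or.inr ⟨List.mem_cons_of_mem _ hm, hg⟩
      · rintro (h' | ⟨hm, hg⟩)
        · exact Or.inl h'
        · rcases List.mem_cons.mp hm with rfl | hm'
          · exact Or.inl (hkey ⟨List.mem_cons_self, hg⟩)
          · exact Or.inr ⟨hm', hg⟩

lemma stepB_fold_spec (lv : Int) (hlv : 0 ≤ lv) (cur : Int → Bool) :
    ∀ (fr : List Int) (row : Array Int) (acc : Array Int),
    row.size = 500001 →
    (∀ x : Int, 0 ≤ x → x ≤ 500000 →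
      (pvDGet row x == -1) = (!(cur x) && !(decide (x ∈ acc.toList)))) →
    (∀ x : Int, 0 ≤ x → x ≤ 500000 → x ∈ acc.toList → pvDGet row x = lv) →
    ∀ row' acc',
      fr.foldl (fun st (n : Int) =>
        [n - 1, n + 1, 2 * n].foldl (fun (st : Array Int × Array Int) (m : Int) =>
          match st with
          | (row, nxt) =>
            if 0 ≤ m && m ≤ 500000 && pvDGet row m == -1
            then (row.setIfInBounds m.toNat lv, nxt.push m) else (row, nxt)) st) (row, acc)
        = (row', acc') →
      row'.size = 500001
      ∧ (∀ x : Int, 0 ≤ x → x ≤ 500000 →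
          (pvDGet row' x == -1) = (!(cur x) && !(decide (x ∈ acc'.toList))))
      ∧ (∀ x : Int, 0 ≤ x → x ≤ 500000 → x ∈ acc'.toList → pvDGet row' x = lv)
      ∧ (∀ x : Int, x ∈ acc'.toList ↔ x ∈ acc.toList ∨ pvReach cur fr x)
      ∧ (∀ x : Int, 0 ≤ x → x ≤ 500000 → x ∉ acc'.toList → pvDGet row' x = pvDGet row x) := by
  intro fr
  induction fr with
  | nil =>
    intro row acc hsz hv hval row' acc' h
    simp only [List.foldl_nil, Prod.mk.injEq] at h
    obtain ⟨h1, h2⟩ := h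
    subst h1; subst h2
    refine ⟨hsz, hv, hval, ?_, fun x _ _ _ => rfl⟩
    intro x
    unfold pvReach
    simp
  | cons n rest ih =>
    intro row acc hsz hv hval row' acc' h
    rw [List.foldl_cons] at h
    have htrip : ∀ x : Int, x ∈ [n - 1, n + 1, 2 * n] ↔ (x = n - 1 ∨ x = n + 1 ∨ x = n * 2) := by
      intro x
      simp only [List.mem_cons, List.not_mem_nil, or_false]
      omega
    rcases he : ([n - 1, n + 1, 2 * n].foldl (fun (st : Array Int × Array Int) (m : Int) =>
        match st with
        | (row, nxt) =>
          if 0 ≤ m && m ≤ 500000 && pvDGet row m == -1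
          then (row.setIfInBounds m.toNat lv, nxt.push m) else (row, nxt)) (row, acc))
      with ⟨row2, acc2⟩
    obtain ⟨hsz2, hv2, hval2, hchar2, hpres2⟩ :=
      stepB_inner_spec lv hlv cur [n - 1, n + 1, 2 * n] row acc hsz hv hval row2 acc2 he
    rw [he] at h
    obtain ⟨hsz', hv', hval', hchar, hpres⟩ := ih row2 acc2 hsz2 hv2 hval2 row' acc' h
    have hreach : ∀ x : Int, pvReach cur (n :: rest) x
        ↔ (x ∈ [n - 1, n + 1, 2 * n] ∧ pvGood cur x) ∨ pvReach cur rest x := by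
      intro x
      unfold pvReach
      rw [htrip x]
      constructor
      · rintro ⟨⟨n', hn', hx⟩, hg⟩
        rcases List.mem_cons.mp hn' with rfl | hn''
        · exact Or.inl ⟨hx, hg⟩
        · exact Or.inr ⟨⟨n', hn'', hx⟩, hg⟩
      · rintro (⟨hx, hg⟩ | ⟨⟨n', hn', hx⟩, hg⟩)
        · exact ⟨⟨n, List.mem_cons_self, hx⟩, hg⟩
        · exact ⟨⟨n', List.mem_cons_of_mem _ hn', hx⟩, hg⟩
    refine ⟨hsz', hv', hval', ?_, ?_⟩
    · intro x
      rw [hchar x, hchar2 x, hreach x, htrip x]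
      tauto
    · intro x hx0 hx1 hx
      have hx2 : x ∉ acc2.toList := fun hmem => hx ((hchar x).mpr (Or.inl hmem))
      rw [hpres x hx0 hx1 hx, hpres2 x hx0 hx1 hx2]

lemma stepB_spec (lv : Int) (hlv : 0 ≤ lv) (frontier : List Int) (row : Array Int)
    (hsz : row.size = 500001) :
    (pvStepB lv frontier row).1.size = 500001
    ∧ (∀ x : Int, x ∈ (pvStepB lv frontier row).2.toList ↔
        pvReach (fun y => !(pvDGet row y == -1)) frontier x)
    ∧ (∀ x : Int, 0 ≤ x → x ≤ 500000 → x ∈ (pvStepB lv frontier row).2.toList →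
        pvDGet (pvStepB lv frontier row).1 x = lv)
    ∧ (∀ x : Int, 0 ≤ x → x ≤ 500000 → x ∉ (pvStepB lv frontier row).2.toList →
        pvDGet (pvStepB lv frontier row).1 x = pvDGet row x) := by
  rcases he : pvStepB lv frontier row with ⟨row', acc'⟩
  obtain ⟨hsz', hv', hval', hchar, hpres⟩ :=
    stepB_fold_spec lv hlv (fun y => !(pvDGet row y == -1)) frontier row #[] hsz
      (by intro x _ _; simp) (by simp) row' acc' he
  refine ⟨hsz', ?_, ?_, ?_⟩
  · intro x
    rw [hchar x]
    simp
  · intro x hx0 hx1 hx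
    exact hval' x hx0 hx1 hx
  · intro x hx0 hx1 hx
    exact hpres x hx0 hx1 hx

-- ---------- the level-indexed state of B's phase-1 ----------
def pvST (N : Int) : Nat → Array Int × Array Int × List Int
  | 0 => ((Array.replicate 500001 (-1 : Int)).setIfInBounds N.toNat 0,
          Array.replicate 500001 (-1 : Int), [N])
  | t + 1 =>
    let s := pvST N t
    if (t + 1) % 2 == 0 then
      let p := pvStepB ((t : Int) + 1) s.2.2 s.1
      (p.1, s.2.1, p.2.toList)
    else
      let p := pvStepB ((t : Int) + 1) s.2.2 s.2.1
      (s.1, p.1, p.2.toList)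

def pvFR (N : Int) (t : Nat) : List Int := (pvST N t).2.2
def pvD (N : Int) (t : Nat) (p : Nat) : Array Int :=
  if p % 2 = 0 then (pvST N t).1 else (pvST N t).2.1

-- visited with parity p by time t (reached at some level s ≤ t, s ≡ p (mod 2))
def pvVis (N : Int) (t : Nat) (p : Nat) (x : Int) : Prop :=
  ∃ s : Nat, s ≤ t ∧ s % 2 = p % 2 ∧ x ∈ pvFR N s

lemma ST_succ (N : Int) (t : Nat) :
    pvFR N (t + 1) = (pvStepB ((t : Int) + 1) (pvFR N t) (pvD N t (t + 1))).2.toList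
    ∧ ∀ p : Nat, pvD N (t + 1) p =
        (if p % 2 = (t + 1) % 2 then (pvStepB ((t : Int) + 1) (pvFR N t) (pvD N t (t + 1))).1
         else pvD N t p) := by
  by_cases hb : (t + 1) % 2 = 0
  · have hbb : ((t + 1) % 2 == 0) = true := by simp [hb]
    have hrow : pvD N t (t + 1) = (pvST N t).1 := by rw [pvD, if_pos hb]
    have hST : pvST N (t + 1)
        = ((pvStepB ((t : Int) + 1) (pvST N t).2.2 (pvST N t).1).1, (pvST N t).2.1,
           (pvStepB ((t : Int) + 1) (pvST N t).2.2 (pvST N t).1).2.toList) := by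
      rw [pvST]
      simp only [hbb, if_true]
    constructor
    · rw [pvFR, hST, hrow, pvFR]
    · intro p
      by_cases hp : p % 2 = 0
      · rw [pvD, if_pos hp, hST, if_pos (by omega), hrow, pvFR]
      · rw [pvD, if_neg hp, hST, if_neg (by omega), pvD, if_neg hp]
  · have hbb : ((t + 1) % 2 == 0) = false := by simp [hb]
    have hrow : pvD N t (t + 1) = (pvST N t).2.1 := by rw [pvD, if_neg hb]
    have hST : pvST N (t + 1)
        = ((pvST N t).1, (pvStepB ((t : Int) + 1) (pvST N t).2.2 (pvST N t).2.1).1,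
           (pvStepB ((t : Int) + 1) (pvST N t).2.2 (pvST N t).2.1).2.toList) := by
      rw [pvST]
      simp only [hbb, Bool.false_eq_true, if_false]
    constructor
    · rw [pvFR, hST, hrow, pvFR]
    · intro p
      by_cases hp : p % 2 = 0
      · rw [pvD, if_pos hp, hST, if_neg (by omega), pvD, if_pos hp]
      · rw [pvD, if_neg hp, hST, if_pos (by omega), hrow, pvFR]

lemma ST_inv (N : Int) (hN0 : 0 ≤ N) (hN1 : N ≤ 500000) : ∀ t : Nat,
    (pvST N t).1.size = 500001 ∧ (pvST N t).2.1.size = 500001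
    ∧ (∀ x : Int, x ∈ pvFR N t → 0 ≤ x ∧ x ≤ 500000)
    ∧ (∀ p : Nat, ∀ x : Int, 0 ≤ x → x ≤ 500000 →
        pvDGet (pvD N t p) x = -1 ∨ 0 ≤ pvDGet (pvD N t p) x)
    ∧ (∀ p : Nat, ∀ x : Int, 0 ≤ x → x ≤ 500000 → ∀ s : Nat,
        (pvDGet (pvD N t p) x = (s : Int) ↔ (s ≤ t ∧ s % 2 = p % 2 ∧ x ∈ pvFR N s))) := by
  intro t
  induction t with
  | zero =>
    have h0 : pvST N 0 = ((Array.replicate 500001 (-1 : Int)).setIfInBounds N.toNat 0,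
        Array.replicate 500001 (-1 : Int), [N]) := rfl
    have hfr0 : pvFR N 0 = [N] := rfl
    have hinit : ∀ x : Int, 0 ≤ x → x ≤ 500000 →
        pvDGet ((Array.replicate 500001 (-1 : Int)).setIfInBounds N.toNat 0) x
          = if x = N then 0 else -1 := by
      intro x hx0 hx1
      unfold pvDGet
      rw [getD_setIfInBounds]
      by_cases hx : x = N
      · subst hx
        rw [if_pos ⟨rfl, by rw [Array.size_replicate]; omega⟩, if_pos rfl]
      · rw [if_neg (by rintro ⟨he, _⟩; exact hx (by omega)), if_neg hx, getD_replicate,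
          if_pos (by omega)]
    have hD0 : ∀ p : Nat, pvD N 0 p
        = (if p % 2 = 0 then (Array.replicate 500001 (-1 : Int)).setIfInBounds N.toNat 0
           else Array.replicate 500001 (-1 : Int)) := by
      intro p
      by_cases hp : p % 2 = 0
      · rw [pvD, if_pos hp, h0, if_pos hp]
      · rw [pvD, if_neg hp, h0, if_neg hp]
    refine ⟨?_, ?_, ?_, ?_, ?_⟩
    · rw [h0, Array.size_setIfInBounds, Array.size_replicate]
    · rw [h0, Array.size_replicate]
    · intro x hx
      rw [hfr0] at hx
      have : x = N := by simpa using hx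
      subst this; exact ⟨hN0, hN1⟩
    · intro p x hx0 hx1
      rw [hD0 p]
      by_cases hp : p % 2 = 0
      · rw [if_pos hp, hinit x hx0 hx1]
        by_cases hx : x = N
        · rw [if_pos hx]; right; omega
        · rw [if_neg hx]; left; rfl
      · rw [if_neg hp]
        left
        unfold pvDGet
        rw [getD_replicate, if_pos (by omega)]
    · intro p x hx0 hx1 s
      rw [hD0 p]
      by_cases hp : p % 2 = 0
      · rw [if_pos hp, hinit x hx0 hx1]
        by_cases hx : x = N
        · subst hx
          rw [if_pos rfl]
          constructor
          · intro h
            have hs : s = 0 := by omega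
            subst hs
            exact ⟨le_refl _, by omega, by rw [hfr0]; simp⟩
          · rintro ⟨hs, _, _⟩
            have : s = 0 := by omega
            subst this; simp
        · rw [if_neg hx]
          constructor
          · intro h; exact absurd h (by omega)
          · rintro ⟨hs, _, hmem⟩
            have : s = 0 := by omega
            subst this
            rw [hfr0] at hmem
            exact absurd (by simpa using hmem) hx
      · rw [if_neg hp]
        have : pvDGet (Array.replicate 500001 (-1 : Int)) x = -1 := by
          unfold pvDGet
          rw [getD_replicate, if_pos (by omega)]
        rw [this]
        constructor
        · intro h; exact absurd h (by omega)
        · rintro ⟨hs, hpar, _⟩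
          have : s = 0 := by omega
          subst this; omega
  | succ t ih =>
    obtain ⟨hsz0, hsz1, hfr, hnn, hchar⟩ := ih
    obtain ⟨hFR1, hDnext⟩ := ST_succ N t
    have hszrow : (pvD N t (t + 1)).size = 500001 := by
      by_cases hb : (t + 1) % 2 = 0
      · rw [pvD, if_pos hb]; exact hsz0
      · rw [pvD, if_neg hb]; exact hsz1
    obtain ⟨hsz', hmem', hval', hpres'⟩ :=
      stepB_spec ((t : Int) + 1) (by omega) (pvFR N t) (pvD N t (t + 1)) hszrow
    have hmemFR : ∀ x : Int, x ∈ pvFR N (t + 1) ↔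
        pvReach (fun y => !(pvDGet (pvD N t (t + 1)) y == -1)) (pvFR N t) x := by
      intro x; rw [hFR1]; exact hmem' x
    refine ⟨?_, ?_, ?_, ?_, ?_⟩
    · have := hDnext 0
      by_cases hb : (t + 1) % 2 = 0
      · have h := hDnext 0
        rw [if_pos (by omega)] at h
        rw [show (pvST N (t + 1)).1 = pvD N (t + 1) 0 from by rw [pvD, if_pos (by omega)], h]
        exact hsz'
      · have h := hDnext 0
        rw [if_neg (by omega)] at h
        rw [show (pvST N (t + 1)).1 = pvD N (t + 1) 0 from by rw [pvD, if_pos (by omega)], h,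
          pvD, if_pos (by omega)]
        exact hsz0
    · by_cases hb : (t + 1) % 2 = 0
      · have h := hDnext 1
        rw [if_neg (by omega)] at h
        rw [show (pvST N (t + 1)).2.1 = pvD N (t + 1) 1 from by rw [pvD, if_neg (by omega)], h,
          pvD, if_neg (by omega)]
        exact hsz1
      · have h := hDnext 1
        rw [if_pos (by omega)] at h
        rw [show (pvST N (t + 1)).2.1 = pvD N (t + 1) 1 from by rw [pvD, if_neg (by omega)], h]
        exact hsz'
    · intro x hx
      have := (hmemFR x).mp hx
      exact ⟨this.2.1, this.2.2.1⟩
    · intro p x hx0 hx1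
      have h := hDnext p
      by_cases hp : p % 2 = (t + 1) % 2
      · rw [if_pos hp] at h
        rw [h]
        by_cases hx : x ∈ pvFR N (t + 1)
        · right
          rw [hval' x hx0 hx1 (hFR1 ▸ hx)]
          omega
        · rw [hpres' x hx0 hx1 (by rw [← hFR1]; exact hx)]
          have := hnn (t + 1) x hx0 hx1
          rw [pvD] at this ⊢
          rcases this with h' | h'
          · left; exact h'
          · right; exact h'
      · rw [if_neg hp] at h
        rw [h]
        exact hnn p x hx0 hx1
    · intro p x hx0 hx1 s
      have h := hDnext p
      by_cases hp : p % 2 = (t + 1) % 2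
      · rw [if_pos hp] at h
        rw [h]
        by_cases hx : x ∈ pvFR N (t + 1)
        · have hxr := (hmemFR x).mp hx
          rw [hval' x hx0 hx1 (hFR1 ▸ hx)]
          constructor
          · intro heq
            have hs : s = t + 1 := by omega
            subst hs
            exact ⟨le_refl _, by omega, hx⟩
          · rintro ⟨hs, hpar, hmem⟩
            rcases Nat.lt_or_ge s (t + 1) with h' | h'
            · exfalso
              have hrow : pvDGet (pvD N t (t + 1)) x = (s : Int) := by
                have heq : pvD N t (t + 1) = pvD N t p := by
                  by_cases hq : p % 2 = 0
                  · rw [pvD, pvD, if_pos (by omega), if_pos hq]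
                  · rw [pvD, pvD, if_neg (by omega), if_neg hq]
                rw [heq]
                exact (hchar p x hx0 hx1 s).mpr ⟨by omega, hpar, hmem⟩
              have : pvDGet (pvD N t (t + 1)) x = -1 := by
                simpa using hxr.2.2.2
              rw [this] at hrow
              omega
            · have : s = t + 1 := by omega
              subst this; omega
        · rw [hpres' x hx0 hx1 (by rw [← hFR1]; exact hx)]
          have heq : pvD N t (t + 1) = pvD N t p := by
            by_cases hq : p % 2 = 0
            · rw [pvD, pvD, if_pos (by omega), if_pos hq]
            · rw [pvD, pvD, if_neg (by omega), if_neg hq]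
          rw [heq, hchar p x hx0 hx1 s]
          constructor
          · rintro ⟨hs, hpar, hmem⟩
            exact ⟨by omega, hpar, hmem⟩
          · rintro ⟨hs, hpar, hmem⟩
            rcases Nat.lt_or_ge s (t + 1) with h' | h'
            · exact ⟨by omega, hpar, hmem⟩
            · have : s = t + 1 := by omega
              subst this
              exact absurd hmem hx
      · rw [if_neg hp] at h
        rw [h, hchar p x hx0 hx1 s]
        constructor
        · rintro ⟨hs, hpar, hmem⟩
          exact ⟨by omega, hpar, hmem⟩
        · rintro ⟨hs, hpar, hmem⟩
          have hne : s ≠ t + 1 := by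
            intro he; subst he; omega
          exact ⟨by omega, hpar, hmem⟩

lemma FR_succ (N : Int) (hN0 : 0 ≤ N) (hN1 : N ≤ 500000) (t : Nat) (x : Int) :
    x ∈ pvFR N (t + 1) ↔
    pvReach (fun y => !(pvDGet (pvD N t (t + 1)) y == -1)) (pvFR N t) x := by
  obtain ⟨hsz0, hsz1, _, _, _⟩ := ST_inv N hN0 hN1 t
  have hszrow : (pvD N t (t + 1)).size = 500001 := by
    by_cases hb : (t + 1) % 2 = 0
    · rw [pvD, if_pos hb]; exact hsz0
    · rw [pvD, if_neg hb]; exact hsz1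
  obtain ⟨hFR1, _⟩ := ST_succ N t
  rw [hFR1]
  exact (stepB_spec ((t : Int) + 1) (by omega) (pvFR N t) (pvD N t (t + 1)) hszrow).2.1 x

-- a dist cell is set iff the position was visited with that parity
lemma dne_vis (N : Int) (hN0 : 0 ≤ N) (hN1 : N ≤ 500000) (t p : Nat) (x : Int)
    (hx0 : 0 ≤ x) (hx1 : x ≤ 500000) :
    ((!(pvDGet (pvD N t p) x == -1)) = true ↔ pvVis N t p x) := by
  obtain ⟨_, _, _, hnn, hchar⟩ := ST_inv N hN0 hN1 t
  constructor
  · intro h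
    have hne : pvDGet (pvD N t p) x ≠ -1 := by simpa using h
    have hge : 0 ≤ pvDGet (pvD N t p) x := by
      rcases hnn p x hx0 hx1 with h' | h'
      · exact absurd h' hne
      · exact h'
    have heq : pvDGet (pvD N t p) x = (((pvDGet (pvD N t p) x).toNat : Nat) : Int) := by omega
    obtain ⟨hs, hpar, hmem⟩ := (hchar p x hx0 hx1 _).mp heq
    exact ⟨_, hs, hpar, hmem⟩
  · rintro ⟨s, hs, hpar, hmem⟩
    have heq := (hchar p x hx0 hx1 s).mpr ⟨hs, hpar, hmem⟩
    rw [heq]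
    have hne : ((s : Int) == -1) = false := by
      rw [beq_eq_false_iff_ne]
      omega
    rw [hne]
    rfl

lemma ST_stable (N : Int) (T : Nat) (hT : pvFR N T = []) :
    ∀ u : Nat, T ≤ u → pvST N u = pvST N T := by
  intro u hu
  induction u, hu using Nat.le_induction with
  | base => rfl
  | succ u hu ih =>
    have hfr : (pvST N u).2.2 = [] := by
      have : pvFR N u = (pvST N u).2.2 := rfl
      rw [← this]
      show pvFR N u = []
      have : pvFR N u = pvFR N T := by rw [pvFR, ih, pvFR]
      rw [this, hT]
    have h1 : pvST N (u + 1) = ((pvST N u).1, (pvST N u).2.1, ([] : List Int)) := by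
      by_cases hb : (u + 1) % 2 = 0
      · have hbb : ((u + 1) % 2 == 0) = true := by simp [hb]
        rw [pvST]
        simp only [hbb, if_true, hfr]
        rfl
      · have hbb : ((u + 1) % 2 == 0) = false := by simp [hb]
        rw [pvST]
        simp only [hbb, Bool.false_eq_true, if_false, hfr]
        rfl
    rw [h1, ih]
    have h2 : (pvST N T).2.2 = [] := hT
    rw [← h2]

lemma BFSB_run (N : Int) (tmax : Nat) : ∀ (fuel t : Nat), tmax - t ≤ fuel → t ≤ tmax →
    ∃ T : Nat, t ≤ T ∧ T ≤ tmax ∧ (T = tmax ∨ pvFR N T = []) ∧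
      pvBFSB (pvFR N t) t tmax (pvST N t).1 (pvST N t).2.1 = ((pvST N T).1, (pvST N T).2.1) := by
  intro fuel
  induction fuel with
  | zero =>
    intro t hf ht
    have ht' : t = tmax := by omega
    subst ht'
    refine ⟨t, le_refl _, le_refl _, Or.inl rfl, ?_⟩
    rw [pvBFSB]
    by_cases hE : (pvFR N t).isEmpty
    · rw [if_pos hE]
    · rw [if_neg hE, dif_pos (le_refl _)]
  | succ fuel ih =>
    intro t hf ht
    by_cases hE : (pvFR N t).isEmpty
    · refine ⟨t, le_refl _, ht, Or.inr (List.isEmpty_iff.mp hE), ?_⟩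
      rw [pvBFSB, if_pos hE]
    · by_cases ht' : tmax ≤ t
      · have : t = tmax := by omega
        subst this
        refine ⟨t, le_refl _, le_refl _, Or.inl rfl, ?_⟩
        rw [pvBFSB, if_neg hE, dif_pos (le_refl _)]
      · obtain ⟨hFR1, hDnext⟩ := ST_succ N t
        obtain ⟨T, hT1, hT2, hT3, hT4⟩ := ih (t + 1) (by omega) (by omega)
        refine ⟨T, by omega, hT2, hT3, ?_⟩
        rw [pvBFSB, if_neg hE, dif_neg ht']
        by_cases hb : (t + 1) % 2 = 0
        · have hbb : ((t + 1) % 2 == 0) = true := by simp [hb]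
          rw [if_pos hbb]
          show pvBFSB (pvStepB ((t : Int) + 1) (pvFR N t) (pvST N t).1).2.toList (t + 1) tmax
            (pvStepB ((t : Int) + 1) (pvFR N t) (pvST N t).1).1 (pvST N t).2.1
            = ((pvST N T).1, (pvST N T).2.1)
          have hrow : pvD N t (t + 1) = (pvST N t).1 := by rw [pvD, if_pos hb]
          have hA : (pvST N (t + 1)).1 = (pvStepB ((t : Int) + 1) (pvFR N t) (pvST N t).1).1 := by
            have h := hDnext 0
            rw [if_pos (by omega), hrow] at h
            rw [show (pvST N (t + 1)).1 = pvD N (t + 1) 0 from by rw [pvD, if_pos (by omega)], h]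
          have hB : (pvST N (t + 1)).2.1 = (pvST N t).2.1 := by
            have h := hDnext 1
            rw [if_neg (by omega)] at h
            rw [show (pvST N (t + 1)).2.1 = pvD N (t + 1) 1 from by rw [pvD, if_neg (by omega)], h,
              pvD, if_neg (by omega)]
          have hFr : pvFR N (t + 1) = (pvStepB ((t : Int) + 1) (pvFR N t) (pvST N t).1).2.toList := by
            rw [hFR1, hrow]
          rw [← hA, ← hB, ← hFr]
          exact hT4
        · have hbb : ((t + 1) % 2 == 0) = false := by simp [hb]
          rw [if_neg (by simp [hbb])]
          show pvBFSB (pvStepB ((t : Int) + 1) (pvFR N t) (pvST N t).2.1).2.toList (t + 1) tmax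
            (pvST N t).1 (pvStepB ((t : Int) + 1) (pvFR N t) (pvST N t).2.1).1
            = ((pvST N T).1, (pvST N T).2.1)
          have hrow : pvD N t (t + 1) = (pvST N t).2.1 := by rw [pvD, if_neg hb]
          have hA : (pvST N (t + 1)).1 = (pvST N t).1 := by
            have h := hDnext 0
            rw [if_neg (by omega)] at h
            rw [show (pvST N (t + 1)).1 = pvD N (t + 1) 0 from by rw [pvD, if_pos (by omega)], h,
              pvD, if_pos (by omega)]
          have hB : (pvST N (t + 1)).2.1 = (pvStepB ((t : Int) + 1) (pvFR N t) (pvST N t).2.1).1 := by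
            have h := hDnext 1
            rw [if_pos (by omega), hrow] at h
            rw [show (pvST N (t + 1)).2.1 = pvD N (t + 1) 1 from by rw [pvD, if_neg (by omega)], h]
          have hFr : pvFR N (t + 1)
              = (pvStepB ((t : Int) + 1) (pvFR N t) (pvST N t).2.1).2.toList := by
            rw [hFR1, hrow]
          rw [← hA, ← hB, ← hFr]
          exact hT4

-- ---------- visited-set facts ----------
lemma vis_mono (N : Int) (t t' p : Nat) (h : t ≤ t') (x : Int) :
    pvVis N t p x → pvVis N t' p x := by
  rintro ⟨s, hs, hp, hx⟩; exact ⟨s, le_trans hs h, hp, hx⟩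

lemma vis_succ_same (N : Int) (t : Nat) (x : Int) :
    pvVis N (t + 1) (t + 1) x ↔ pvVis N t (t + 1) x ∨ x ∈ pvFR N (t + 1) := by
  constructor
  · rintro ⟨s, hs, hp, hx⟩
    rcases Nat.lt_or_ge s (t + 1) with h | h
    · exact Or.inl ⟨s, by omega, hp, hx⟩
    · have : s = t + 1 := by omega
      subst this; exact Or.inr hx
  · rintro (⟨s, hs, hp, hx⟩ | hx)
    · exact ⟨s, by omega, hp, hx⟩
    · exact ⟨t + 1, le_refl _, rfl, hx⟩

lemma vis_succ_other (N : Int) (t p : Nat) (hp : p % 2 ≠ (t + 1) % 2) (x : Int) :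
    pvVis N (t + 1) p x ↔ pvVis N t p x := by
  constructor
  · rintro ⟨s, hs, hpar, hx⟩
    rcases Nat.lt_or_ge s (t + 1) with h | h
    · exact ⟨s, by omega, hpar, hx⟩
    · have : s = t + 1 := by omega
      subst this; exact absurd hpar.symm (by omega)
  · rintro ⟨s, hs, hpar, hx⟩; exact ⟨s, by omega, hpar, hx⟩

lemma vis_parity (N : Int) (t p q : Nat) (h : p % 2 = q % 2) (x : Int) :
    pvVis N t p x → pvVis N t q x := by
  rintro ⟨s, hs, hpar, hx⟩; exact ⟨s, hs, by omega, hx⟩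

-- once the frontier is empty the visited set is closed under the three moves
lemma vis_closed (N : Int) (hN0 : 0 ≤ N) (hN1 : N ≤ 500000) (t : Nat)
    (hemp : pvFR N t = []) (x : Int) (p : Nat) (hv : pvVis N t p x) (y : Int)
    (hy : y = x - 1 ∨ y = x + 1 ∨ y = x * 2) (hy0 : 0 ≤ y) (hy1 : y ≤ 500000) :
    pvVis N t (p + 1) y := by
  obtain ⟨s, hs, hpar, hx⟩ := hv
  have hslt : s < t := by
    rcases Nat.lt_or_ge s t with h' | h'
    · exact h'
    · exfalso
      have : s = t := by omega
      subst this
      rw [hemp] at hx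
      simp at hx
  by_cases hcy : pvDGet (pvD N s (s + 1)) y = -1
  · have hmem : y ∈ pvFR N (s + 1) := by
      rw [FR_succ N hN0 hN1 s y]
      exact ⟨⟨x, hx, hy⟩, hy0, hy1, by simp [hcy]⟩
    exact ⟨s + 1, by omega, by omega, hmem⟩
  · have hvy : pvVis N s (s + 1) y := by
      rw [← dne_vis N hN0 hN1 s (s + 1) y hy0 hy1]
      simpa using hcy
    obtain ⟨s', hs', hpar', hy'⟩ := hvy
    exact ⟨s', by omega, by omega, hy'⟩

-- when a frontier dies out, every board cell has been visited with both parities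
lemma vis_total (N : Int) (hN0 : 0 ≤ N) (hN1 : N ≤ 500000) (t : Nat)
    (hemp : pvFR N t = []) :
    ∀ x : Int, 0 ≤ x → x ≤ 500000 → ∀ p : Nat, pvVis N t p x := by
  have hdown : ∀ k : Nat, k ≤ N.toNat → pvVis N t k (N - k) := by
    intro k
    induction k with
    | zero =>
      intro _
      refine ⟨0, by omega, by omega, ?_⟩
      show N - 0 ∈ [N]
      simp
    | succ k ihk =>
      intro hk
      have hv := ihk (by omega)
      have := vis_closed N hN0 hN1 t hemp (N - k) k hv (N - (k + 1))
        (by left; ring) (by omega) (by omega)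
      exact this
  have h0a : pvVis N t N.toNat 0 := by
    have := hdown N.toNat (le_refl _)
    have he : N - (N.toNat : Int) = 0 := by omega
    rwa [he] at this
  have h0b : pvVis N t (N.toNat + 1) 0 := by
    have := vis_closed N hN0 hN1 t hemp 0 N.toNat h0a 0
      (by right; right; ring) (le_refl _) (by omega)
    exact this
  have h0 : ∀ p : Nat, pvVis N t p 0 := by
    intro p
    by_cases hp : p % 2 = N.toNat % 2
    · exact vis_parity N t N.toNat p (by omega) 0 h0a
    · exact vis_parity N t (N.toNat + 1) p (by omega) 0 h0b
  have hup : ∀ m : Nat, (m : Int) ≤ 500000 → ∀ p : Nat, pvVis N t p (m : Int) := by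
    intro m
    induction m with
    | zero => intro _ p; exact h0 p
    | succ m ihm =>
      intro hm p
      have hv := ihm (by push_cast at hm; omega) (p + 1)
      have := vis_closed N hN0 hN1 t hemp (m : Int) (p + 1) hv ((m : Int) + 1)
        (by right; left; ring) (by omega) (by push_cast at hm ⊢; omega)
      have hpar : (p + 1 + 1) % 2 = p % 2 := by omega
      have := vis_parity N t (p + 1 + 1) p hpar _ this
      rwa [show ((m : Int) + 1) = ((m + 1 : Nat) : Int) from by push_cast; ring] at this
  intro x hx0 hx1 p
  have := hup x.toNat (by omega) p
  rwa [show ((x.toNat : Nat) : Int) = x from by omega] at this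

-- the scan condition on the finished table reads off pvVis
lemma dget_vis (N : Int) (hN0 : 0 ≤ N) (hN1 : N ≤ 500000) (T t' : Nat)
    (hts : t' ≤ T ∨ pvFR N T = [])
    (x : Int) (hx0 : 0 ≤ x) (hx1 : x ≤ 500000) :
    (0 ≤ pvDGet (pvD N T t') x ∧ pvDGet (pvD N T t') x ≤ (t' : Int)) ↔ pvVis N t' t' x := by
  obtain ⟨_, _, _, _, hchar⟩ := ST_inv N hN0 hN1 T
  constructor
  · rintro ⟨hge, hle⟩
    have heq : pvDGet (pvD N T t') x = (((pvDGet (pvD N T t') x).toNat : Nat) : Int) := by omega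
    obtain ⟨hs, hpar, hmem⟩ := (hchar t' x hx0 hx1 _).mp heq
    exact ⟨_, by omega, hpar, hmem⟩
  · rintro ⟨s, hs, hpar, hmem⟩
    have hsT : s ≤ T := by
      rcases hts with hts | hTe
      · omega
      · rcases Nat.lt_or_ge T s with h' | h'
        · exfalso
          have : pvFR N s = pvFR N T := by
            rw [pvFR, ST_stable N T hTe s (by omega), pvFR]
          rw [this, hTe] at hmem
          simp at hmem
        · exact h'
    have heq := (hchar t' x hx0 hx1 s).mpr ⟨hsT, hpar, hmem⟩
    rw [heq]
    omega

-- ---------- the tmax counter ----------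
lemma tmax_ge_start (K : Int) : ∀ start : Nat, start ≤ pvTmaxLoop K start := by
  have h : ∀ fuel start : Nat, 1000 - start ≤ fuel → start ≤ pvTmaxLoop K start := by
    intro fuel
    induction fuel with
    | zero =>
      intro start hfu
      rw [pvTmaxLoop, dif_neg (by rintro ⟨h1, _⟩; omega)]
    | succ fuel ih =>
      intro start hfu
      rw [pvTmaxLoop]
      by_cases hc : start < 1000 ∧ K + ((start : Int) + 1) * ((start : Int) + 2) / 2 ≤ 500000
      · rw [dif_pos hc]
        exact le_trans (by omega) (ih (start + 1) (by omega))
      · rw [dif_neg hc]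
  intro start
  exact h 1000 start (by omega)

lemma tmax_ge (K : Int) : ∀ (fuel m start : Nat), m - start ≤ fuel → start ≤ m → m ≤ 1000 →
    2 * K + (m : Int) * ((m : Int) + 1) ≤ 1000000 → m ≤ pvTmaxLoop K start := by
  intro fuel
  induction fuel with
  | zero =>
    intro m start h1 h2 _ _
    have : start = m := by omega
    subst this
    exact tmax_ge_start K start
  | succ fuel ih =>
    intro m start h1 h2 h3 h4
    rcases Nat.eq_or_lt_of_le h2 with heq | hlt
    · subst heq
      exact tmax_ge_start K start
    · have hcast : ((start : Int) + 1) ≤ (m : Int) := by exact_mod_cast hlt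
      have hm0 : (0 : Int) ≤ (m : Int) := by positivity
      have hmono : ((start : Int) + 1) * ((start : Int) + 2) ≤ (m : Int) * ((m : Int) + 1) := by
        nlinarith
      have hq := Int.even_iff.mp (Int.even_mul_succ_self ((start : Int) + 1))
      have hq' : (((start : Int) + 1) * ((start : Int) + 2)) % 2 = 0 := by
        rw [show ((start : Int) + 1) * ((start : Int) + 2)
          = ((start : Int) + 1) * (((start : Int) + 1) + 1) from by ring]
        exact hq
      have hcond : start < 1000 ∧ K + ((start : Int) + 1) * ((start : Int) + 2) / 2 ≤ 500000 := by
        constructor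
        · omega
        · omega
      rw [pvTmaxLoop, dif_pos hcond]
      exact ih m (start + 1) (by omega) (by omega) h3 h4

-- ---------- the master loop equivalence ----------
lemma loopAB (N : Int) (hN0 : 0 ≤ N) (hN1 : N ≤ 500000) (K0 : Int) (hK00 : 0 ≤ K0) (T : Nat)
    (hTe : T = pvTmaxLoop K0 0 ∨ pvFR N T = []) :
    ∀ (fuel : Nat) (t : Nat) (K : Int) (v0 v1 : Array Bool) (queue : List Int),
    (500001 - K).toNat ≤ fuel →
    2 * K = 2 * K0 + (t : Int) * ((t : Int) + 1) →
    v0.size = 500001 → v1.size = 500001 →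
    (∀ x : Int, 0 ≤ x → x ≤ 500000 → (pvGetRow v0 x = true ↔ pvVis N t 0 x)) →
    (∀ x : Int, 0 ≤ x → x ≤ 500000 → (pvGetRow v1 x = true ↔ pvVis N t 1 x)) →
    (∀ x : Int, x ∈ queue ↔ x ∈ pvFR N t) →
    (queue = [] → (K ≤ 500000 ∧ ¬ pvVis N t t K)) →
    pvLoopA v0 v1 queue t K = pvScanB (pvST N T).1 (pvST N T).2.1 t K := by
  intro fuel
  induction fuel with
  | zero =>
    intro t K v0 v1 queue hf hrel _ _ _ _ hq hprev
    have hpos : (0 : Int) ≤ (t : Int) * ((t : Int) + 1) := by positivity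
    have hK0 : 0 ≤ K := by omega
    by_cases hE : queue.isEmpty
    · exfalso
      have hnil : queue = [] := List.isEmpty_iff.mp hE
      obtain ⟨hK5, hnv⟩ := hprev hnil
      have hfr : pvFR N t = [] := by
        rw [List.eq_nil_iff_forall_not_mem]
        intro a ha
        have : a ∈ queue := (hq a).mpr ha
        rw [hnil] at this
        simp at this
      exact hnv (vis_total N hN0 hN1 t hfr K hK0 hK5 t)
    · have h5 : 500001 ≤ K := by omega
      rw [pvLoopA, if_neg hE, dif_pos (by omega)]
      rw [pvScanB, dif_pos (by omega)]
  | succ fuel ih =>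
    intro t K v0 v1 queue hf hrel hs0 hs1 hr0 hr1 hq hprev
    have hpos : (0 : Int) ≤ (t : Int) * ((t : Int) + 1) := by positivity
    have hK0 : 0 ≤ K := by omega
    have hKt : (t : Int) * ((t : Int) + 1) ≤ 2 * K := by omega
    by_cases hE : queue.isEmpty
    · exfalso
      have hnil : queue = [] := List.isEmpty_iff.mp hE
      obtain ⟨hK5, hnv⟩ := hprev hnil
      have hfr : pvFR N t = [] := by
        rw [List.eq_nil_iff_forall_not_mem]
        intro a ha
        have : a ∈ queue := (hq a).mpr ha
        rw [hnil] at this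
        simp at this
      exact hnv (vis_total N hN0 hN1 t hfr K hK0 hK5 t)
    · rw [pvLoopA, if_neg hE, pvScanB]
      by_cases hKb : K + ((t : Int) + 1) > 500000
      · rw [dif_pos hKb, dif_pos hKb]
      · rw [dif_neg hKb, dif_neg hKb]
        have hK'0 : 0 ≤ K + ((t : Int) + 1) := by omega
        have hK'5 : K + ((t : Int) + 1) ≤ 500000 := by omega
        have ht999 : t + 1 ≤ 999 := by
          by_contra hcon
          have h999 : (999 : Int) ≤ (t : Int) := by exact_mod_cast (by omega : (999 : Nat) ≤ t)
          nlinarith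
        have hts : t + 1 ≤ T ∨ pvFR N T = [] := by
          rcases hTe with hM | hemp
          · left
            rw [hM]
            exact tmax_ge K0 (t + 1) (t + 1) 0 (by omega) (by omega) (by omega)
              (by push_cast; nlinarith [hrel, hK'5])
          · right; exact hemp
        have hdg := dget_vis N hN0 hN1 T (t + 1) hts (K + ((t : Int) + 1)) hK'0 hK'5
        push_cast at hdg
        have hKt' : 2 * (K + ((t : Int) + 1))
            = 2 * K0 + ((t + 1 : Nat) : Int) * (((t + 1 : Nat) : Int) + 1) := by
          push_cast
          linear_combination hrel
        have hfuel : (500001 - (K + ((t : Int) + 1))).toNat ≤ fuel := by omega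
        by_cases hb : (t + 1) % 2 = 0
        · have hbb : ((t + 1) % 2 == 0) = true := by simp [hb]
          have hselA : (if ((t + 1) % 2 == 0) = true then v0 else v1) = v0 := if_pos hbb
          have hselB : (if ((t + 1) % 2 == 0) = true then (pvST N T).1 else (pvST N T).2.1)
              = (pvST N T).1 := if_pos hbb
          rw [hselA, hselB]
          have hsel : pvD N T (t + 1) = (pvST N T).1 := by rw [pvD, if_pos (by omega)]
          rw [hsel] at hdg
          have hrowK : pvGetRow v0 (K + ((t : Int) + 1)) = true ↔
              pvVis N t (t + 1) (K + ((t : Int) + 1)) := by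
            rw [hr0 _ hK'0 hK'5]
            exact ⟨vis_parity N t 0 (t + 1) (by omega) _, vis_parity N t (t + 1) 0 (by omega) _⟩
          by_cases hva : pvVis N t (t + 1) (K + ((t : Int) + 1))
          · rw [if_pos (hrowK.mpr hva),
              if_pos (hdg.mpr (vis_mono N t (t + 1) (t + 1) (by omega) _ hva))]
          · rw [if_neg (fun h => hva (hrowK.mp h))]
            have hcurvis : ∀ y : Int, 0 ≤ y → y ≤ 500000 →
                (pvGetRow v0 y = true ↔ pvVis N t (t + 1) y) := by
              intro y hy0 hy1
              rw [hr0 y hy0 hy1]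
              exact ⟨vis_parity N t 0 (t + 1) (by omega) _, vis_parity N t (t + 1) 0 (by omega) _⟩
            obtain ⟨hnone, hsome⟩ := expandA_spec (K + ((t : Int) + 1)) (fun y => pvGetRow v0 y)
              queue v0 #[] hs0 (by intro x _ _; simp) (by simp)
            have hc : ∀ y : Int, 0 ≤ y → y ≤ 500000 →
                (fun y => pvGetRow v0 y) y = !(pvDGet (pvD N t (t + 1)) y == -1) := by
              intro y hy0 hy1
              rw [Bool.eq_iff_iff]
              exact (hcurvis y hy0 hy1).trans (dne_vis N hN0 hN1 t (t + 1) y hy0 hy1).symm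
            have hreachFR : ∀ x : Int, pvReach (fun y => pvGetRow v0 y) queue x ↔
                x ∈ pvFR N (t + 1) := by
              intro x
              rw [FR_succ N hN0 hN1 t x]
              exact pvReach_congr _ _ queue (pvFR N t) hc hq x
            cases hm : pvExpandA (K + ((t : Int) + 1)) queue v0 #[] with
            | none =>
              have hK'FR : K + ((t : Int) + 1) ∈ pvFR N (t + 1) := (hreachFR _).mp (hnone hm)
              rw [if_pos (hdg.mpr ⟨t + 1, le_refl _, rfl, hK'FR⟩)]
            | some pa =>
              obtain ⟨v', acc'⟩ := pa
              obtain ⟨hsz', hv', hacc', hchar', hneg'⟩ := hsome v' acc' hm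
              have hqnew : ∀ x : Int, x ∈ acc'.toList ↔ x ∈ pvFR N (t + 1) := by
                intro x
                rw [hchar' x, ← hreachFR x]
                simp
              have hvis1 : ¬ pvVis N (t + 1) (t + 1) (K + ((t : Int) + 1)) := by
                rw [vis_succ_same]
                rintro (h | h)
                · exact hva h
                · exact hneg' ((hreachFR _).mpr h)
              rw [if_neg (hdg.not.mpr hvis1)]
              have hrownew : ∀ x : Int, 0 ≤ x → x ≤ 500000 →
                  (pvGetRow v' x = true ↔ pvVis N (t + 1) (t + 1) x) := by
                intro x hx0 hx1
                rw [hv' x hx0 hx1, vis_succ_same, Bool.or_eq_true, decide_eq_true_eq]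
                exact or_congr (hcurvis x hx0 hx1) (hqnew x)
              show (if ((t + 1) % 2 == 0) = true
                  then pvLoopA v' v1 acc'.toList (t + 1) (K + ((t : Int) + 1))
                  else pvLoopA v0 v' acc'.toList (t + 1) (K + ((t : Int) + 1)))
                = pvScanB (pvST N T).1 (pvST N T).2.1 (t + 1) (K + ((t : Int) + 1))
              rw [if_pos hbb]
              apply ih (t + 1) (K + ((t : Int) + 1)) v' v1 acc'.toList hfuel hKt' hsz' hs1
              · intro x hx0 hx1
                rw [hrownew x hx0 hx1]
                exact ⟨vis_parity N (t + 1) (t + 1) 0 (by omega) _,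
                  vis_parity N (t + 1) 0 (t + 1) (by omega) _⟩
              · intro x hx0 hx1
                rw [vis_succ_other N t 1 (by omega)]
                exact hr1 x hx0 hx1
              · exact hqnew
              · exact fun _ => ⟨hK'5, hvis1⟩
        · have hbb : ((t + 1) % 2 == 0) = false := by simp [hb]
          have hnb : ¬ (((t + 1) % 2 == 0) = true) := by simp [hbb]
          have hselA : (if ((t + 1) % 2 == 0) = true then v0 else v1) = v1 := if_neg hnb
          have hselB : (if ((t + 1) % 2 == 0) = true then (pvST N T).1 else (pvST N T).2.1)
              = (pvST N T).2.1 := if_neg hnb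
          rw [hselA, hselB]
          have hsel : pvD N T (t + 1) = (pvST N T).2.1 := by rw [pvD, if_neg (by omega)]
          rw [hsel] at hdg
          have hrowK : pvGetRow v1 (K + ((t : Int) + 1)) = true ↔
              pvVis N t (t + 1) (K + ((t : Int) + 1)) := by
            rw [hr1 _ hK'0 hK'5]
            exact ⟨vis_parity N t 1 (t + 1) (by omega) _, vis_parity N t (t + 1) 1 (by omega) _⟩
          by_cases hva : pvVis N t (t + 1) (K + ((t : Int) + 1))
          · rw [if_pos (hrowK.mpr hva),
              if_pos (hdg.mpr (vis_mono N t (t + 1) (t + 1) (by omega) _ hva))]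
          · rw [if_neg (fun h => hva (hrowK.mp h))]
            have hcurvis : ∀ y : Int, 0 ≤ y → y ≤ 500000 →
                (pvGetRow v1 y = true ↔ pvVis N t (t + 1) y) := by
              intro y hy0 hy1
              rw [hr1 y hy0 hy1]
              exact ⟨vis_parity N t 1 (t + 1) (by omega) _, vis_parity N t (t + 1) 1 (by omega) _⟩
            obtain ⟨hnone, hsome⟩ := expandA_spec (K + ((t : Int) + 1)) (fun y => pvGetRow v1 y)
              queue v1 #[] hs1 (by intro x _ _; simp) (by simp)
            have hc : ∀ y : Int, 0 ≤ y → y ≤ 500000 →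
                (fun y => pvGetRow v1 y) y = !(pvDGet (pvD N t (t + 1)) y == -1) := by
              intro y hy0 hy1
              rw [Bool.eq_iff_iff]
              exact (hcurvis y hy0 hy1).trans (dne_vis N hN0 hN1 t (t + 1) y hy0 hy1).symm
            have hreachFR : ∀ x : Int, pvReach (fun y => pvGetRow v1 y) queue x ↔
                x ∈ pvFR N (t + 1) := by
              intro x
              rw [FR_succ N hN0 hN1 t x]
              exact pvReach_congr _ _ queue (pvFR N t) hc hq x
            cases hm : pvExpandA (K + ((t : Int) + 1)) queue v1 #[] with
            | none =>
              have hK'FR : K + ((t : Int) + 1) ∈ pvFR N (t + 1) := (hreachFR _).mp (hnone hm)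
              rw [if_pos (hdg.mpr ⟨t + 1, le_refl _, rfl, hK'FR⟩)]
            | some pa =>
              obtain ⟨v', acc'⟩ := pa
              obtain ⟨hsz', hv', hacc', hchar', hneg'⟩ := hsome v' acc' hm
              have hqnew : ∀ x : Int, x ∈ acc'.toList ↔ x ∈ pvFR N (t + 1) := by
                intro x
                rw [hchar' x, ← hreachFR x]
                simp
              have hvis1 : ¬ pvVis N (t + 1) (t + 1) (K + ((t : Int) + 1)) := by
                rw [vis_succ_same]
                rintro (h | h)
                · exact hva h
                · exact hneg' ((hreachFR _).mpr h)
              rw [if_neg (hdg.not.mpr hvis1)]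
              have hrownew : ∀ x : Int, 0 ≤ x → x ≤ 500000 →
                  (pvGetRow v' x = true ↔ pvVis N (t + 1) (t + 1) x) := by
                intro x hx0 hx1
                rw [hv' x hx0 hx1, vis_succ_same, Bool.or_eq_true, decide_eq_true_eq]
                exact or_congr (hcurvis x hx0 hx1) (hqnew x)
              show (if ((t + 1) % 2 == 0) = true
                  then pvLoopA v' v1 acc'.toList (t + 1) (K + ((t : Int) + 1))
                  else pvLoopA v0 v' acc'.toList (t + 1) (K + ((t : Int) + 1)))
                = pvScanB (pvST N T).1 (pvST N T).2.1 (t + 1) (K + ((t : Int) + 1))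
              rw [if_neg hnb]
              apply ih (t + 1) (K + ((t : Int) + 1)) v0 v' acc'.toList hfuel hKt' hs0 hsz'
              · intro x hx0 hx1
                rw [vis_succ_other N t 0 (by omega)]
                exact hr0 x hx0 hx1
              · intro x hx0 hx1
                rw [hrownew x hx0 hx1]
                exact ⟨vis_parity N (t + 1) (t + 1) 1 (by omega) _,
                  vis_parity N (t + 1) 1 (t + 1) (by omega) _⟩
              · exact hqnew
              · exact fun _ => ⟨hK'5, hvis1⟩


theorem solution_eq_aux : ∀ (N K : Int), Pre_solution N K → solution N K = solution_alt N K := by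
  intro N K hpre
  obtain ⟨hN0, hN1, hK0⟩ := hpre
  unfold solution solution_alt
  by_cases h : (N == K) = true
  · rw [if_pos h, if_pos h]
  · rw [if_neg h, if_neg h]
    obtain ⟨T, _, hT2, hT3, hT4⟩ := BFSB_run N (pvTmaxLoop K 0) (pvTmaxLoop K 0) 0
      (by omega) (by omega)
    have h0 : pvST N 0 = ((Array.replicate 500001 (-1 : Int)).setIfInBounds N.toNat 0,
        Array.replicate 500001 (-1 : Int), [N]) := rfl
    have e0 : pvFR N 0 = [N] := by rw [pvFR, h0]
    have e1 : (pvST N 0).1 = (Array.replicate 500001 (-1 : Int)).setIfInBounds N.toNat 0 := by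
      rw [h0]
    have e2 : (pvST N 0).2.1 = Array.replicate 500001 (-1 : Int) := by rw [h0]
    rw [e0, e1, e2] at hT4
    have hB := hT4
    show pvLoopA (pvMarkRow (Array.replicate 500001 false) N) (Array.replicate 500001 false)
        [N] 0 K
      = pvScanB (pvBFSB [N] 0 (pvTmaxLoop K 0)
          ((Array.replicate 500001 (-1 : Int)).setIfInBounds N.toNat 0)
          (Array.replicate 500001 (-1 : Int))).1
        (pvBFSB [N] 0 (pvTmaxLoop K 0)
          ((Array.replicate 500001 (-1 : Int)).setIfInBounds N.toNat 0)
          (Array.replicate 500001 (-1 : Int))).2 0 K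
    rw [hB]
    apply loopAB N hN0 hN1 K hK0 T hT3 ((500001 - K).toNat) 0 K _ _ [N] (le_refl _)
      (by push_cast; ring) (by rw [pvMarkRow, Array.size_setIfInBounds, Array.size_replicate])
      (by rw [Array.size_replicate])
    · intro x hx0 hx1
      have hlhs : pvGetRow (pvMarkRow (Array.replicate 500001 false) N) x = true ↔ x = N := by
        unfold pvGetRow pvMarkRow
        rw [getD_setIfInBounds]
        by_cases hx : x = N
        · subst hx
          rw [if_pos ⟨rfl, by rw [Array.size_replicate]; omega⟩]
          simp
        · rw [if_neg (by rintro ⟨he, _⟩; exact hx (by omega)), getD_replicate,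
            if_pos (by omega)]
          simp [hx]
      rw [hlhs]
      constructor
      · rintro rfl
        exact ⟨0, le_refl _, rfl, by show x ∈ [x]; simp⟩
      · rintro ⟨s, hs, _, hmem⟩
        have : s = 0 := by omega
        subst this
        rw [e0] at hmem
        simpa using hmem
    · intro x hx0 hx1
      constructor
      · intro hcon
        exfalso
        unfold pvGetRow at hcon
        rw [getD_replicate, if_pos (by omega)] at hcon
        simp at hcon
      · rintro ⟨s, hs, hpar, _⟩
        exfalso
        omega
    · intro x
      rw [e0]
    · intro hcon
      simp at hcon

-- ===== VERDICT (by name: the statement is the Claim_ definition above) =====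
theorem solution_spec : Claim_equal_solution := by
  intro N K _ hpre
  unfold Spec_solution
  exact solution_eq_aux N K hpre
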